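-- pv_equiv track=rewrite | github.com/viyy/LearningPy | Puzzles/words_in_message/task2.py | del_with_last_char
-- ===== SOURCE A (Python) =====
-- separators = [".", ",", ":", ";", " ", "!", "?"]
--
-- def del_with_last_char(msg, char):
--     res = ""
--     tmp = ""
--     for c in msg:
--         if c not in separators:
--             tmp += c
--         else:
--             if len(tmp) > 0 and tmp[len(tmp)-1] != char:
--                 res += tmp
--             res += c
--             tmp = ""
--     return res
-- ===== SOURCE B (Python) =====
-- separators = [".", ",", ":", ";", " ", "!", "?"]
--
-- def del_with_last_char(msg, char):
--     # Jump from separator to separator with str.find instead of scanning and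
--     # buffering characters one by one: locate the nearest separator, slice the
--     # word before it, keep it unless its last character equals char, skip past
--     # the separator, repeat.  The tail after the last separator is never
--     # reached, so (as in the task) it is dropped.
--     out = []
--     rest = msg
--     while True:
--         i = min((j for j in (rest.find(s) for s in separators) if j != -1), default=-1)
--         if i == -1:
--             return "".join(out)
--         word = rest[:i]
--         if word and word[-1] != char:
--             out.append(word)
--         out.append(rest[i])
--         rest = rest[i + 1:]
-- ===== Notes on version B (the rewrite author's own statement) =====
-- stated objective: faster
-- what changed: B replaces A's character-by-character Python scan with a word buffer by a separator-jumping loop: it locates the nearest separator with str.find over the separator list (min of the hits), slices out the word before it with rest[:i], keeps it unless it ends with char, and continues on rest[i+1:].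
import Mathlib
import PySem

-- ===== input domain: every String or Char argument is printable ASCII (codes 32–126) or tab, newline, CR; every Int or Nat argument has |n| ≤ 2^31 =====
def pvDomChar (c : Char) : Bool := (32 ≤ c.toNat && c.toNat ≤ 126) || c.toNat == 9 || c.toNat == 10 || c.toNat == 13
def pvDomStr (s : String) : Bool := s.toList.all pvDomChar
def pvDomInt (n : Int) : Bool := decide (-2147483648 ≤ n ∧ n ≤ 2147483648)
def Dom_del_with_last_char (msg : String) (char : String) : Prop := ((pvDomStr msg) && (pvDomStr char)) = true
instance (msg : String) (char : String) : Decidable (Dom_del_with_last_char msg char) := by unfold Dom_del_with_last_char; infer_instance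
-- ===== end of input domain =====

-- B replaces A's character-by-character scan with a word buffer by a separator-jumping
-- loop (nearest separator via str.find, slice the word before it, continue after it);
-- same return value, measured faster in Python (find/slice run in C).

-- ===== PORT A =====
-- the module constant `separators`
def pvSeps : List Char := ['.', ',', ':', ';', ' ', '!', '?']

-- A's loop over the characters of msg with state (res, tmp); tmp[len(tmp)-1]
-- is ported as tmp.drop (tmp.length - 1), which is exactly the one-character
-- string [last of tmp] whenever the guard len(tmp) > 0 holds.
def pvALoop (char : String) : List Char → List Char → List Char → List Char
  | [], res, _tmp => res
  | c :: cs, res, tmp =>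
    if c ∉ pvSeps then
      pvALoop char cs res (tmp ++ [c])
    else
      pvALoop char cs
        ((if 0 < tmp.length ∧ String.ofList (tmp.drop (tmp.length - 1)) ≠ char then res ++ tmp else res) ++ [c]) []

def del_with_last_char (msg : String) (char : String) : String :=
  String.ofList (pvALoop char msg.toList [] [])

-- ===== PORT B =====
-- Source B's  min((j for j in (rest.find(s) for s in separators) if j != -1), default=-1)
-- (rest.find(s) is PySem.Chars.find; min with default is List.min? with a -1 fallback)
def pvMinFind (rest : List Char) : Int :=
  match PySem.List.min? ((pvSeps.map (fun s => PySem.Chars.find rest [s])).filter (fun j => j ≠ -1)) (fun x => x) with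
  | some m => m
  | none => -1

-- Source B's while-loop with state (rest, out), out kept as the already-joined chars;
-- `word and word[-1] != char` is ported through PySem.List.pyGet? word (-1) (under
-- the guard `word ≠ []` it is `some` of the last character); the fuel argument only
-- makes the recursion structural — it starts at msg.length + 1 and never runs out,
-- since rest shrinks by at least one character every iteration.
def pvBLoop (char : String) : Nat → List Char → List Char → List Char
  | 0, _rest, out => out
  | fuel + 1, rest, out =>
    let i := pvMinFind rest
    if i = -1 then out
    else
      let word := PySem.List.slice rest none (some i)
      let out1 := if word ≠ [] ∧ (PySem.List.pyGet? word (-1)).map (fun c => String.ofList [c]) ≠ some char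
                  then out ++ word else out
      let out2 := out1 ++ (match PySem.List.pyGet? rest i with
                    | some c => [c]
                    | none => [])
      pvBLoop char fuel (PySem.List.slice rest (some (i + 1)) none) out2

def del_with_last_char_alt (msg : String) (char : String) : String :=
  String.ofList (pvBLoop char (msg.toList.length + 1) msg.toList [])

-- ===== PRECONDITION & SPEC =====
def Spec_del_with_last_char (msg : String) (char : String) (out : String) : Prop := out = del_with_last_char_alt msg char
instance (msg : String) (char : String) (out : String) : Decidable (Spec_del_with_last_char msg char out) := by unfold Spec_del_with_last_char; infer_instance

-- ===== CLAIM (what is proved, stated in full; the proofs are below) =====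
def Claim_equal_del_with_last_char : Prop := ∀ (msg : String) (char : String), Dom_del_with_last_char msg char → Spec_del_with_last_char msg char (del_with_last_char msg char)

-- ===== LEMMAS AND PROOFS =====

-- the common intermediate form: the (word, separator) pairs of a message
def pvPairs : List Char → List Char → List (List Char × Char)
  | [], _word => []
  | c :: cs, word =>
    if c ∈ pvSeps then (word, c) :: pvPairs cs [] else pvPairs cs (word ++ [c])

-- the contribution of one (word, separator) pair to the output
def pvEmit (char : String) (p : List Char × Char) : List Char :=
  (if p.1 ≠ [] ∧ String.ofList (p.1.drop (p.1.length - 1)) ≠ char then p.1 else []) ++ [p.2]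

-- A's loop equals res followed by the joined pair contributions, from word state tmp.
theorem pvALoop_eq_pairs (char : String) (cs : List Char) :
    ∀ (res tmp : List Char),
      pvALoop char cs res tmp = res ++ ((pvPairs cs tmp).map (pvEmit char)).flatten := by
  induction cs with
  | nil => intro res tmp; simp [pvALoop, pvPairs]
  | cons c cs ih =>
    intro res tmp
    by_cases hc : c ∈ pvSeps
    · simp only [pvALoop, pvPairs, hc, if_pos, not_true_eq_false, if_false]
      rw [ih]
      simp only [List.map_cons, List.flatten_cons, pvEmit]
      have hcond : (0 < tmp.length ∧ String.ofList (tmp.drop (tmp.length - 1)) ≠ char) ↔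
          (tmp ≠ [] ∧ String.ofList (tmp.drop (tmp.length - 1)) ≠ char) := by
        constructor <;> rintro ⟨h1, h2⟩ <;> refine ⟨?_, h2⟩
        · exact List.ne_nil_of_length_pos h1
        · exact List.length_pos_of_ne_nil h1
      by_cases hk : tmp ≠ [] ∧ String.ofList (tmp.drop (tmp.length - 1)) ≠ char
      · rw [if_pos (hcond.mpr hk), if_pos hk]; simp
      · rw [if_neg (fun h => hk (hcond.mp h)), if_neg hk]; simp
    · simp only [pvALoop, pvPairs, hc, not_false_eq_true, if_true]
      exact ih res (tmp ++ [c])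

-- [s] is a prefix of t iff t starts with s
theorem pvSingleton_prefix (s : Char) (t : List Char) : [s] <+: t ↔ t.head? = some s := by
  cases t with
  | nil => simp
  | cons a t => simp [List.cons_prefix_cons, eq_comm]

-- [s] is an infix of l iff s occurs in l
theorem pvSingleton_infix (s : Char) (l : List Char) : [s] <:+: l ↔ s ∈ l := by
  constructor
  · intro h; exact h.subset (by simp)
  · intro h; obtain ⟨pre, suf, rfl⟩ := List.append_of_mem h
    exact ⟨pre, suf, by simp⟩

-- a list without separators has no pairs
theorem pvPairs_no_sep (l : List Char) (h : ∀ c ∈ l, c ∉ pvSeps) :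
    ∀ tmp, pvPairs l tmp = [] := by
  induction l with
  | nil => intro tmp; simp [pvPairs]
  | cons c cs ih =>
    intro tmp
    have hc : c ∉ pvSeps := h c (by simp)
    simp only [pvPairs, hc, if_false]
    exact ih (fun x hx => h x (by simp [hx])) _

-- pairs of (sep-free word) ++ sep ++ rest
theorem pvPairs_split (w : List Char) (c : Char) (r : List Char)
    (hw : ∀ x ∈ w, x ∉ pvSeps) (hc : c ∈ pvSeps) :
    ∀ tmp, pvPairs (w ++ c :: r) tmp = (tmp ++ w, c) :: pvPairs r [] := by
  induction w with
  | nil => intro tmp; simp [pvPairs, hc]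
  | cons a w ih =>
    intro tmp
    have ha : a ∉ pvSeps := hw a (by simp)
    simp only [List.cons_append, pvPairs, ha, if_false]
    rw [ih (fun x hx => hw x (by simp [hx])) (tmp ++ [a])]
    simp

-- any non-failing find of a separator in w ++ c :: r points at or after position |w|
theorem pvFind_ge (w : List Char) (c : Char) (r : List Char)
    (hw : ∀ x ∈ w, x ∉ pvSeps) (s : Char) (hs : s ∈ pvSeps)
    (hne : PySem.Chars.find (w ++ c :: r) [s] ≠ -1) :
    (w.length : Int) ≤ PySem.Chars.find (w ++ c :: r) [s] := by
  have hle := PySem.Chars.neg_one_le_find (w ++ c :: r) [s]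
  have h0 : 0 ≤ PySem.Chars.find (w ++ c :: r) [s] := by omega
  obtain ⟨hpre, _⟩ := PySem.Chars.find_spec h0
  have hget : (w ++ c :: r)[(PySem.Chars.find (w ++ c :: r) [s]).toNat]? = some s := by
    rw [← List.head?_drop]; exact (pvSingleton_prefix s _).mp hpre
  by_contra hlt
  have ht : (PySem.Chars.find (w ++ c :: r) [s]).toNat < w.length := by omega
  rw [List.getElem?_append_left ht] at hget
  exact hw s (List.mem_of_getElem? hget) hs

-- find of the separator that sits right after the sep-free word w finds exactly |w|
theorem pvFind_at_sep (w : List Char) (c : Char) (r : List Char)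
    (hw : ∀ x ∈ w, x ∉ pvSeps) (hc : c ∈ pvSeps) :
    PySem.Chars.find (w ++ c :: r) [c] = (w.length : Int) := by
  have hmem : c ∈ w ++ c :: r := by simp
  have hne : PySem.Chars.find (w ++ c :: r) [c] ≠ -1 := by
    rw [Ne, PySem.Chars.find_eq_neg_one_iff, pvSingleton_infix]
    simp
  have hge := pvFind_ge w c r hw c hc hne
  have hle := PySem.Chars.neg_one_le_find (w ++ c :: r) [c]
  have h0 : 0 ≤ PySem.Chars.find (w ++ c :: r) [c] := by omega
  obtain ⟨_, hmin⟩ := PySem.Chars.find_spec h0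
  have hpw : [c] <+: List.drop w.length (w ++ c :: r) := by
    rw [List.drop_left' rfl]
    exact ⟨r, rfl⟩
  have hub : ¬ w.length < (PySem.Chars.find (w ++ c :: r) [c]).toNat := fun h => hmin w.length h hpw
  omega

-- pvMinFind of a separator-free list is -1
theorem pvMinFind_no_sep (l : List Char) (h : ∀ c ∈ l, c ∉ pvSeps) : pvMinFind l = -1 := by
  have hfil : (pvSeps.map (fun s => PySem.Chars.find l [s])).filter (fun j => j ≠ -1) = [] := by
    rw [List.filter_eq_nil_iff]
    intro j hj
    obtain ⟨s, hs, rfl⟩ := List.mem_map.mp hj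
    have : PySem.Chars.find l [s] = -1 := by
      rw [PySem.Chars.find_eq_neg_one_iff, pvSingleton_infix]
      exact fun hmem => h s hmem hs
    simp [this]
  unfold pvMinFind
  rw [hfil]
  simp [(PySem.List.min?_eq_none_iff ([] : List Int) (fun x => x)).mpr rfl]

-- pvMinFind finds the position of the first separator
theorem pvMinFind_split (w : List Char) (c : Char) (r : List Char)
    (hw : ∀ x ∈ w, x ∉ pvSeps) (hc : c ∈ pvSeps) :
    pvMinFind (w ++ c :: r) = (w.length : Int) := by
  have hfc := pvFind_at_sep w c r hw hc
  have hmemc : (w.length : Int) ∈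
      (pvSeps.map (fun s => PySem.Chars.find (w ++ c :: r) [s])).filter (fun j => j ≠ -1) := by
    refine List.mem_filter.mpr ⟨List.mem_map.mpr ⟨c, hc, hfc⟩, by simp⟩
  unfold pvMinFind
  rcases hmq : PySem.List.min? ((pvSeps.map (fun s => PySem.Chars.find (w ++ c :: r) [s])).filter (fun j => j ≠ -1)) (fun x => x) with _ | m
  · simp only [hmq]
    rw [PySem.List.min?_eq_none_iff] at hmq
    rw [hmq] at hmemc
    simp at hmemc
  · simp only [hmq]
    have hm := PySem.List.min?_mem hmq
    obtain ⟨hmm, hmne⟩ := List.mem_filter.mp hm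
    obtain ⟨s, hs, hsf⟩ := List.mem_map.mp hmm
    have hge : (w.length : Int) ≤ m := by
      rw [← hsf]
      exact pvFind_ge w c r hw s hs (by simpa [hsf] using hmne)
    have hle : m ≤ (w.length : Int) := PySem.List.min?_isMin hmq _ hmemc
    omega

-- B's per-step emission coincides with pvEmit
theorem pvEmit_of_word (char : String) (l w : List Char) (c : Char) :
    (if w ≠ [] ∧ (PySem.List.pyGet? w (-1)).map (fun c => String.ofList [c]) ≠ some char
     then l ++ w else l) ++ [c] = l ++ pvEmit char (w, c) := by
  by_cases hw : w = []
  · subst hw; simp [pvEmit]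
  · have hlast : PySem.List.pyGet? w (-1) = some (w.getLast hw) := by
      rw [PySem.List.pyGet?_neg_one, List.getLast?_eq_some_getLast hw]
    have hdrop : w.drop (w.length - 1) = [w.getLast hw] := List.drop_length_sub_one hw
    unfold pvEmit
    simp only [hlast, hdrop, Option.map_some]
    by_cases hk : String.ofList [w.getLast hw] ≠ char
    · rw [if_pos ⟨hw, by simpa using hk⟩, if_pos ⟨hw, hk⟩]; simp
    · have hkk : String.ofList [w.getLast hw] = char := not_not.mp hk
      rw [if_neg (by simp [hkk]), if_neg (by simp [hkk])]
      simp

-- the head of a nonempty dropWhile fails the predicate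
theorem pvDropWhile_head (p : Char → Bool) (l : List Char) (c : Char) (r : List Char)
    (h : l.dropWhile p = c :: r) : p c = false := by
  induction l with
  | nil => simp at h
  | cons a t ih =>
    rw [List.dropWhile_cons] at h
    by_cases hpa : p a
    · rw [if_pos hpa] at h; exact ih h
    · rw [if_neg hpa] at h
      cases h
      simpa using hpa

-- the predicate `not a separator`
def pvNotSep : Char → Bool := fun c => decide (c ∉ pvSeps)

-- B's loop equals out followed by the joined pair contributions
theorem pvBLoop_eq_pairs (char : String) :
    ∀ (fuel : Nat) (rest out : List Char), rest.length ≤ fuel →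
      pvBLoop char fuel rest out = out ++ ((pvPairs rest []).map (pvEmit char)).flatten := by
  intro fuel
  induction fuel with
  | zero =>
    intro rest out hlen
    have : rest = [] := List.eq_nil_of_length_eq_zero (by omega)
    subst this
    simp [pvBLoop, pvPairs]
  | succ fuel ih =>
    intro rest out hlen
    by_cases hno : ∀ c ∈ rest, c ∉ pvSeps
    · rw [pvPairs_no_sep rest hno []]
      simp [pvBLoop, pvMinFind_no_sep rest hno]
    · -- decompose rest at its first separator
      rcases hd : rest.dropWhile pvNotSep with _ | ⟨c, r⟩
      · exfalso
        apply hno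
        intro x hx
        have hx' : x ∈ rest.takeWhile pvNotSep := by
          conv at hx => rw [← List.takeWhile_append_dropWhile (p := pvNotSep) (l := rest)]
          rw [hd] at hx
          simpa using hx
        simpa [pvNotSep] using List.mem_takeWhile_imp hx'
      · have hrest : rest = rest.takeWhile pvNotSep ++ c :: r := by
          conv_lhs => rw [← List.takeWhile_append_dropWhile (p := pvNotSep) (l := rest)]
          rw [hd]
        set w := rest.takeWhile pvNotSep with hwdef
        have hw : ∀ x ∈ w, x ∉ pvSeps := by
          intro x hx
          rw [hwdef] at hx
          have h2 := List.mem_takeWhile_imp hx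
          simp only [pvNotSep, decide_eq_true_eq] at h2
          exact h2
        have hc : c ∈ pvSeps := by
          simpa [pvNotSep] using pvDropWhile_head pvNotSep rest c r hd
        have hmf : pvMinFind (w ++ c :: r) = (w.length : Int) := pvMinFind_split w c r hw hc
        rw [hrest] at hlen ⊢
        simp only [pvBLoop, hmf]
        rw [if_neg (by omega)]
        have hslice1 : PySem.List.slice (w ++ c :: r) none (some (w.length : Int)) = w := by
          rw [PySem.List.slice_to_natCast]; exact List.take_left
        have hget : PySem.List.pyGet? (w ++ c :: r) (w.length : Int) = some c := by
          rw [PySem.List.pyGet?_natCast, List.getElem?_append_right (by omega)]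
          simp
        have hslice2 : PySem.List.slice (w ++ c :: r) (some ((w.length : Int) + 1)) none = r := by
          have h1 : ((w.length : Int) + 1) = ((w.length + 1 : Nat) : Int) := by push_cast; ring
          have h2 : w ++ c :: r = (w ++ [c]) ++ r := by simp
          rw [h1, PySem.List.slice_from_natCast, h2, List.drop_left' (by simp)]
        rw [hslice1, hget, hslice2]
        rw [ih r _ (by simp at hlen ⊢; omega)]
        rw [pvPairs_split w c r hw hc []]
        simp only [List.nil_append, List.map_cons, List.flatten_cons]
        rw [pvEmit_of_word char out w c]
        simp

-- ===== VERDICT (by name: the statement is the Claim_ definition above) =====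
theorem del_with_last_char_spec : Claim_equal_del_with_last_char := by
  intro msg char _
  unfold Spec_del_with_last_char del_with_last_char del_with_last_char_alt
  rw [pvALoop_eq_pairs, pvBLoop_eq_pairs char (msg.toList.length + 1) msg.toList [] (by omega)]
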